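-- pv_equiv track=rewrite | github.com/Nilsae/Leetcode | Heap/medium/codesignla_find_k_shortest_strings.py | find_k_shortest
-- ===== SOURCE A (Python) =====
-- from typing import List
-- import heapq
--
-- def find_k_shortest(strings: List[str], k: int) -> List[str]:
--     d = {}
--     for i, s in enumerate(strings):
--         d[s] = i
--     l =  heapq.nsmallest(k, d.items(), key = lambda x: (len(x[0]), x[1]))
--     ans = []
--     for item in l:
--         ans.append(item[0])
--     return ans
-- ===== SOURCE B (Python) =====
-- from typing import List
--
-- def find_k_shortest(strings: List[str], k: int) -> List[str]:
--     # Dedup by scanning from the right (keeps each string's last index),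
--     # then one full sort by (length, index) and a clamped slice.
--     seen = set()
--     pairs = []
--     for i, s in reversed(list(enumerate(strings))):
--         if s not in seen:
--             seen.add(s)
--             pairs.append((s, i))
--     pairs.sort(key=lambda p: (len(p[0]), p[1]))
--     return [s for s, _ in pairs[:max(k, 0)]]
-- ===== Notes on version B (the rewrite author's own statement) =====
-- stated objective: simpler
-- what changed: A builds a dict in forward order and selects k items with heapq.nsmallest; B dedups with a seen-set scanning from the right (keeping each string's last index), then does one full sort by (length, index) and takes a clamped slice.
import Mathlib
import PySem

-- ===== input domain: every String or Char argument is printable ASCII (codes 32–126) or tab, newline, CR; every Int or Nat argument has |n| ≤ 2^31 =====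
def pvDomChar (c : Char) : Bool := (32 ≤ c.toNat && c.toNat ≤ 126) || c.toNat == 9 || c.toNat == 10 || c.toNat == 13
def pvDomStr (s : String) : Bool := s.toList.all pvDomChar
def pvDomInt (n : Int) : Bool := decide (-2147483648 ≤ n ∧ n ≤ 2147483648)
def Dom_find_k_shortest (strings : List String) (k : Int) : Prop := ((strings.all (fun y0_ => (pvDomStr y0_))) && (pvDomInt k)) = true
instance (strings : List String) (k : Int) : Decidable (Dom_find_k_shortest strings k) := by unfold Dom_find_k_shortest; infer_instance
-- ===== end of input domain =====

-- B replaces A's dict-build + heapq.nsmallest selection by a right-to-left seen-set dedup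
-- followed by one full sort and a clamped slice (objective: simpler).

-- ===== PORT A =====
-- d = {}; for i, s in enumerate(strings): d[s] = i
-- l = heapq.nsmallest(k, d.items(), key=lambda x: (len(x[0]), x[1]))
--   (ported by heapq's documented contract: sorted(iterable, key=key)[:k], empty for k ≤ 0)
-- ans = []; for item in l: ans.append(item[0])
def find_k_shortest (strings : List String) (k : Int) : List String :=
  let d : PySem.Dict String Int :=
    (PySem.List.enumerate strings).foldl (fun d p => d.insert p.2 p.1) PySem.Dict.empty
  let l := (PySem.List.sorted2 d.items (fun x => PySem.Str.len x.1) (fun x => x.2)).take k.toNat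
  l.foldl (fun ans item => ans ++ [item.1]) []

-- ===== PORT B =====
-- seen = set(); pairs = []
-- for i, s in reversed(list(enumerate(strings))):
--   if s not in seen: seen.add(s); pairs.append((s, i))
-- pairs.sort(key=lambda p: (len(p[0]), p[1]))
-- return [s for s, _ in pairs[:max(k, 0)]]
def find_k_shortest_alt (strings : List String) (k : Int) : List String :=
  let st := (PySem.List.enumerate strings).reverse.foldl
      (fun (st : PySem.Set String × List (String × Int)) p =>
        if PySem.Set.contains st.1 p.2 then st
        else (PySem.Set.add st.1 p.2, st.2 ++ [(p.2, p.1)]))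
      (PySem.Set.empty, [])
  let pairs := PySem.List.sorted2 st.2 (fun p => PySem.Str.len p.1) (fun p => p.2)
  (PySem.List.slice pairs none (some (max k 0))).map (fun p => p.1)

-- ===== PRECONDITION & SPEC =====
def Spec_find_k_shortest (strings : List String) (k : Int) (out : List String) : Prop := out = find_k_shortest_alt strings k
instance (strings : List String) (k : Int) (out : List String) : Decidable (Spec_find_k_shortest strings k out) := by unfold Spec_find_k_shortest; infer_instance

-- ===== CLAIM (what is proved, stated in full; the proofs are below) =====
def Claim_equal_find_k_shortest : Prop := ∀ (strings : List String) (k : Int), Dom_find_k_shortest strings k → Spec_find_k_shortest strings k (find_k_shortest strings k)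

-- ===== LEMMAS AND PROOFS =====

-- insertBy only consults `before` between the new element and list members
theorem pvInsertBy_congr {α : Type} (f g : α → α → Bool) (x : α) (ys : List α)
    (h : ∀ b ∈ ys, f x b = g x b) :
    PySem.List.insertBy f x ys = PySem.List.insertBy g x ys := by
  induction ys with
  | nil => rfl
  | cons y ys ih =>
    rw [PySem.List.insertBy.eq_2, PySem.List.insertBy.eq_2, h y (by simp)]
    split
    · rfl
    · rw [ih (fun b hb => h b (by simp [hb]))]

-- an insertion sort depends on `before` only on pairs drawn from the input
theorem pvFoldl_insertBy_congr {α : Type} (f g : α → α → Bool) (l acc : List α)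
    (h : ∀ a ∈ l, ∀ b, (b ∈ l ∨ b ∈ acc) → f a b = g a b) :
    l.foldl (fun acc x => PySem.List.insertBy f x acc) acc
      = l.foldl (fun acc x => PySem.List.insertBy g x acc) acc := by
  induction l generalizing acc with
  | nil => rfl
  | cons a l ih =>
    simp only [List.foldl_cons]
    rw [pvInsertBy_congr f g a acc (fun b hb => h a (by simp) b (Or.inr hb))]
    apply ih
    intro a' ha' b hb
    apply h a' (List.mem_cons_of_mem a ha')
    rcases hb with hb | hb
    · exact Or.inl (List.mem_cons_of_mem a hb)
    · rcases (PySem.List.insertBy_mem_iff g a b acc).mp hb with hb | hb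
      · subst hb
        exact Or.inl (by simp)
      · exact Or.inr hb

-- lexicographic (a, x) < (b, y) as a single Int key, given 0 ≤ x, y < M
theorem pvLexKey (a b x y M : Int) (hx : 0 ≤ x) (hxM : x < M) (hy : 0 ≤ y) (hyM : y < M) :
    (a < b ∨ (¬ b < a ∧ x < y)) ↔ a * M + x < b * M + y := by
  have hM : (0 : Int) < M := by omega
  have step : ∀ u v : Int, u < v → u * M + M ≤ v * M := by
    intro u v huv
    nlinarith [mul_le_mul_of_nonneg_right (show u + 1 ≤ v by omega) (le_of_lt hM)]
  constructor
  · rintro (hab | ⟨hba, hxy⟩)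
    · have h1 := step a b hab
      omega
    · rcases eq_or_lt_of_le (not_lt.mp hba) with he | hlt
      · subst he; omega
      · have h1 := step a b hlt
        omega
  · intro h
    rcases lt_trichotomy a b with hab | hab | hab
    · exact Or.inl hab
    · subst hab
      exact Or.inr ⟨lt_irrefl a, by omega⟩
    · exfalso
      have h1 := step b a hab
      omega

-- sorted2 with key (len ∘ fst, snd) is sorted with the flattened Int key, under snd-bounds
theorem pvSorted2_eq_sorted (xs : List (String × Int)) (M : Int)
    (hb : ∀ p ∈ xs, 0 ≤ p.2 ∧ p.2 < M) :
    PySem.List.sorted2 xs (fun p => PySem.Str.len p.1) (fun p => p.2)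
      = PySem.List.sorted xs (fun p => PySem.Str.len p.1 * M + p.2) := by
  rw [PySem.List.sorted_eq_foldl_insertBy]
  simp only [PySem.List.sorted2]
  refine pvFoldl_insertBy_congr _ _ xs [] ?_
  intro a ha b hbm
  have hbm' : b ∈ xs := by
    rcases hbm with h | h
    · exact h
    · exact absurd h (List.not_mem_nil)
  obtain ⟨ha1, ha2⟩ := hb a ha
  obtain ⟨hb1, hb2⟩ := hb b hbm'
  rw [if_neg Bool.false_ne_true]
  beta_reduce
  rw [Bool.eq_iff_iff]
  simp only [Bool.or_eq_true, Bool.and_eq_true, Bool.not_eq_true', decide_eq_true_eq,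
    decide_eq_false_iff_not]
  exact pvLexKey (PySem.Str.len a.1) (PySem.Str.len b.1) a.2 b.2 M ha1 ha2 hb1 hb2

-- the dict loop's lookup is last-occurrence lookup in the enumerated list
theorem pvGetFold (l : List (Int × String)) (d : PySem.Dict String Int) (s : String) :
    (l.foldl (fun d p => d.insert p.2 p.1) d).get? s
      = ((l.reverse.find? (fun p => p.2 == s)).map Prod.fst).or (d.get? s) := by
  induction l generalizing d with
  | nil => simp
  | cons a l ih =>
    simp only [List.foldl_cons, List.reverse_cons, ih, List.find?_append]
    cases hf : l.reverse.find? (fun p => p.2 == s) with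
    | some p => simp [Option.or]
    | none =>
      by_cases h : a.2 = s
      · simp [Option.or, List.find?, h]
      · have hb : (a.2 == s) = false := beq_eq_false_iff_ne.mpr h
        simp [Option.or, List.find?, hb, PySem.Dict.get?_insert, Ne.symm h]

-- recursive reading of B's dedup loop
def pvBrec : List (Int × String) → PySem.Set String → List (String × Int)
  | [], _ => []
  | p :: rest, seen =>
      if PySem.Set.contains seen p.2 then pvBrec rest seen
      else (p.2, p.1) :: pvBrec rest (PySem.Set.add seen p.2)

theorem pvBrec_cons (p : Int × String) (rest : List (Int × String)) (seen : PySem.Set String) :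
    pvBrec (p :: rest) seen =
      if PySem.Set.contains seen p.2 then pvBrec rest seen
      else (p.2, p.1) :: pvBrec rest (PySem.Set.add seen p.2) := rfl

theorem pvSetContains (seen : PySem.Set String) (s : String) :
    PySem.Set.contains seen s = true ↔ s ∈ seen := by
  simp [PySem.Set.contains]

theorem pvBfold (l : List (Int × String)) (seen : PySem.Set String) (out : List (String × Int)) :
    (l.foldl
      (fun (st : PySem.Set String × List (String × Int)) p =>
        if PySem.Set.contains st.1 p.2 then st
        else (PySem.Set.add st.1 p.2, st.2 ++ [(p.2, p.1)]))
      (seen, out)).2 = out ++ pvBrec l seen := by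
  induction l generalizing seen out with
  | nil => simp [pvBrec]
  | cons p rest ih =>
    by_cases hc : PySem.Set.contains seen p.2
    · simp only [List.foldl_cons, if_pos hc, show pvBrec (p :: rest) seen = pvBrec rest seen
        from by rw [pvBrec_cons, if_pos hc]]
      exact ih seen out
    · simp only [List.foldl_cons, if_neg hc,
        show pvBrec (p :: rest) seen = (p.2, p.1) :: pvBrec rest (PySem.Set.add seen p.2)
        from by rw [pvBrec_cons, if_neg hc]]
      rw [ih]
      simp

theorem pvMemBrec (l : List (Int × String)) (seen : PySem.Set String) (s : String) (i : Int) :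
    (s, i) ∈ pvBrec l seen ↔ s ∉ seen ∧ l.find? (fun p => p.2 == s) = some (i, s) := by
  induction l generalizing seen with
  | nil => simp [pvBrec]
  | cons p rest ih =>
    obtain ⟨pi, ps⟩ := p
    by_cases hps : ps = s
    · subst hps
      have hfind : List.find? (fun q => q.2 == ps) ((pi, ps) :: rest) = some (pi, ps) :=
        List.find?_cons_of_pos (by simp)
      rw [hfind]
      by_cases hc : PySem.Set.contains seen ps
      · have hpm : ps ∈ seen := (pvSetContains seen ps).mp hc
        rw [show pvBrec ((pi, ps) :: rest) seen = pvBrec rest seen from by rw [pvBrec_cons, if_pos hc], ih]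
        constructor
        · rintro ⟨h1, _⟩; exact absurd hpm h1
        · rintro ⟨h1, _⟩; exact absurd hpm h1
      · have hpm : ps ∉ seen := fun hh => hc ((pvSetContains seen ps).mpr hh)
        rw [show pvBrec ((pi, ps) :: rest) seen = (ps, pi) :: pvBrec rest (PySem.Set.add seen ps)
          from by rw [pvBrec_cons, if_neg hc]]
        rw [List.mem_cons, ih]
        constructor
        · rintro (h | ⟨h1, _⟩)
          · rw [Prod.mk.injEq] at h
            refine ⟨by rw [h.1]; exact hpm, by rw [h.1, h.2]⟩
          · exact absurd ((PySem.Set.mem_add seen ps ps).mpr (Or.inr rfl)) h1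
        · rintro ⟨h1, h2⟩
          left
          rw [Option.some_inj, Prod.mk.injEq] at h2
          simp [h2.1]
    · have hfind : List.find? (fun q => q.2 == s) ((pi, ps) :: rest)
          = List.find? (fun q => q.2 == s) rest :=
        List.find?_cons_of_neg (by simp [hps])
      rw [hfind]
      by_cases hc : PySem.Set.contains seen ps
      · rw [show pvBrec ((pi, ps) :: rest) seen = pvBrec rest seen from by rw [pvBrec_cons, if_pos hc], ih]
      · rw [show pvBrec ((pi, ps) :: rest) seen = (ps, pi) :: pvBrec rest (PySem.Set.add seen ps)
          from by rw [pvBrec_cons, if_neg hc]]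
        rw [List.mem_cons, ih]
        have hmem : s ∈ PySem.Set.add seen ps ↔ s ∈ seen := by
          rw [PySem.Set.mem_add]
          exact ⟨fun h => h.elim id (fun h => absurd h.symm hps), Or.inl⟩
        rw [hmem]
        constructor
        · rintro (h | h)
          · rw [Prod.mk.injEq] at h
            exact absurd h.1.symm hps
          · exact h
        · exact Or.inr

theorem pvNodupBrec (l : List (Int × String)) (seen : PySem.Set String) :
    (pvBrec l seen).Nodup := by
  induction l generalizing seen with
  | nil => simp [pvBrec]
  | cons p rest ih =>
    by_cases hc : PySem.Set.contains seen p.2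
    · rw [show pvBrec (p :: rest) seen = pvBrec rest seen
        from by simp only [pvBrec]; rw [if_pos hc]]
      exact ih seen
    · rw [show pvBrec (p :: rest) seen = (p.2, p.1) :: pvBrec rest (PySem.Set.add seen p.2)
        from by rw [pvBrec_cons, if_neg hc], List.nodup_cons]
      refine ⟨fun h => ?_, ih _⟩
      have := ((pvMemBrec rest _ p.2 p.1).mp h).1
      exact this ((PySem.Set.mem_add seen p.2 p.2).mpr (Or.inr rfl))

-- every element of B's pair list is (strings[j], j) for some j < length
theorem pvBrecShape (strings : List String) (q : String × Int)
    (hq : q ∈ pvBrec (PySem.List.enumerate strings).reverse PySem.Set.empty) :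
    ∃ (j : Nat) (h : j < strings.length), q = (strings[j], (j : Int)) := by
  obtain ⟨s, i⟩ := q
  obtain ⟨_, hfind⟩ := (pvMemBrec _ _ s i).mp hq
  have hmem : (i, s) ∈ (PySem.List.enumerate strings).reverse := List.mem_of_find?_eq_some hfind
  rw [List.mem_reverse] at hmem
  obtain ⟨j, hj, hpq⟩ := (PySem.List.mem_enumerate_iff strings 0 (i, s)).mp hmem
  refine ⟨j, hj, ?_⟩
  simp at hpq
  simp [hpq.1, hpq.2]

-- A's dict items and B's pair list contain exactly the same pairs
theorem pvMemAB (strings : List String) (s : String) (i : Int) :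
    (s, i) ∈ ((PySem.List.enumerate strings).foldl
        (fun d p => d.insert p.2 p.1) (PySem.Dict.empty : PySem.Dict String Int)).items
      ↔ (s, i) ∈ pvBrec (PySem.List.enumerate strings).reverse PySem.Set.empty := by
  have hnd : ((PySem.List.enumerate strings).foldl
      (fun d p => d.insert p.2 p.1) (PySem.Dict.empty : PySem.Dict String Int)).keys.Nodup :=
    PySem.Dict.nodup_keys_foldl_insert_key _ (fun (p : Int × String) => p.2)
      (fun _ (p : Int × String) => p.1) _ (by rw [PySem.Dict.keys_empty]; exact List.nodup_nil)
  rw [← PySem.Dict.get?_eq_some_iff_mem_items _ _ _ hnd, pvGetFold, pvMemBrec]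
  rw [and_iff_right (show s ∉ (PySem.Set.empty : PySem.Set String) from by
    simp [PySem.Set.empty])]
  simp only [PySem.Dict.get?_empty, Option.or_none]
  cases hf : (PySem.List.enumerate strings).reverse.find? (fun p => p.2 == s) with
  | none => simp
  | some p =>
    have hps : p.2 = s := by simpa using List.find?_some hf
    simp only [Option.map_some, Option.some_inj]
    constructor
    · intro h
      exact Prod.ext_iff.mpr ⟨h, hps⟩
    · intro h
      rw [h]

-- ===== the main argument =====
theorem pvSortedEq (strings : List String) :
    PySem.List.sorted2
        ((PySem.List.enumerate strings).foldl
          (fun d p => d.insert p.2 p.1) (PySem.Dict.empty : PySem.Dict String Int)).items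
        (fun x => PySem.Str.len x.1) (fun x => x.2)
      = PySem.List.sorted2 (pvBrec (PySem.List.enumerate strings).reverse PySem.Set.empty)
        (fun p => PySem.Str.len p.1) (fun p => p.2) := by
  set d := (PySem.List.enumerate strings).foldl
      (fun d p => d.insert p.2 p.1) (PySem.Dict.empty : PySem.Dict String Int) with hd
  set B := pvBrec (PySem.List.enumerate strings).reverse PySem.Set.empty with hB
  set M : Int := (strings.length : Int) + 1 with hM
  -- shape and bounds
  have hshape : ∀ q ∈ B, ∃ (j : Nat) (h : j < strings.length), q = (strings[j], (j : Int)) :=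
    fun q hq => pvBrecShape strings q hq
  have hboundsB : ∀ p ∈ B, 0 ≤ p.2 ∧ p.2 < M := by
    intro p hp
    obtain ⟨j, hj, hpq⟩ := hshape p hp
    subst hpq
    constructor
    · exact Int.natCast_nonneg j
    · omega
  -- membership equivalence and nodups give a permutation
  have hmem : ∀ a : String × Int, a ∈ d.items ↔ a ∈ B := by
    rintro ⟨s, i⟩; exact pvMemAB strings s i
  have hndk : d.keys.Nodup :=
    PySem.Dict.nodup_keys_foldl_insert_key _ (fun (p : Int × String) => p.2)
      (fun _ (p : Int × String) => p.1) _ (by rw [PySem.Dict.keys_empty]; exact List.nodup_nil)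
  have hndA : d.items.Nodup := by
    have : (d.items.map Prod.fst).Nodup := by
      have hk : d.items.map Prod.fst = d.keys := by
        simp [PySem.Dict.keys]
      rw [hk]; exact hndk
    exact this.of_map
  have hndB : B.Nodup := pvNodupBrec _ _
  have hperm : B.Perm d.items :=
    ((List.perm_ext_iff_of_nodup hndA hndB).mpr hmem).symm
  have hboundsA : ∀ p ∈ d.items, 0 ≤ p.2 ∧ p.2 < M :=
    fun p hp => hboundsB p ((hmem p).mp hp)
  -- flatten both tuple keys into one Int key
  rw [pvSorted2_eq_sorted d.items M hboundsA, pvSorted2_eq_sorted B M hboundsB]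
  -- the key is injective on B's elements
  have hinj : ∀ p ∈ B, ∀ q ∈ B,
      PySem.Str.len p.1 * M + p.2 = PySem.Str.len q.1 * M + q.2 → p = q := by
    intro p hp q hq hk
    obtain ⟨j, hj, hpq⟩ := hshape p hp
    obtain ⟨j', hj', hpq'⟩ := hshape q hq
    subst hpq; subst hpq'
    dsimp only at hk
    have hMpos : (0 : Int) < M := by omega
    have h1 : ((j : Int)) % M = ((j' : Int)) % M := by
      have e1 : ((j : Int)) % M = (((j : Int)) + PySem.Str.len strings[j] * M) % M :=
        (Int.add_mul_emod_self_right _ _ _).symm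
      have e2 : ((j' : Int)) % M = (((j' : Int)) + PySem.Str.len strings[j'] * M) % M :=
        (Int.add_mul_emod_self_right _ _ _).symm
      rw [e1, e2]
      congr 1
      omega
    have hj1 : ((j : Int)) % M = (j : Int) := Int.emod_eq_of_lt (by omega) (by omega)
    have hj2 : ((j' : Int)) % M = (j' : Int) := Int.emod_eq_of_lt (by omega) (by omega)
    have : (j : Int) = (j' : Int) := by omega
    have hjj : j = j' := by exact_mod_cast this
    subst hjj
    rfl
  -- name the sorted order of B and transport it to d.items
  have hzperm : (PySem.List.sorted B (fun p => PySem.Str.len p.1 * M + p.2)).Perm d.items :=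
    (PySem.List.sorted_perm B _ false).trans hperm
  have hle : (PySem.List.sorted B (fun p => PySem.Str.len p.1 * M + p.2)).Pairwise
      (fun a b => PySem.Str.len a.1 * M + a.2 ≤ PySem.Str.len b.1 * M + b.2) :=
    PySem.List.sorted_pairwise B _
  have hzn : (PySem.List.sorted B (fun p => PySem.Str.len p.1 * M + p.2)).Nodup :=
    (PySem.List.sorted_perm B _ false).nodup_iff.mpr hndB
  have hlt : (PySem.List.sorted B (fun p => PySem.Str.len p.1 * M + p.2)).Pairwise
      (fun a b => PySem.Str.len a.1 * M + a.2 < PySem.Str.len b.1 * M + b.2) := by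
    have hand := List.Pairwise.and hle hzn
    refine hand.imp_of_mem ?_
    intro a b ha hb h
    have haB : a ∈ B := (PySem.List.sorted_perm B _ false).mem_iff.mp ha
    have hbB : b ∈ B := (PySem.List.sorted_perm B _ false).mem_iff.mp hb
    rcases lt_or_eq_of_le h.1 with h' | h'
    · exact h'
    · exact absurd (hinj a haB b hbB h') h.2
  exact PySem.List.sorted_eq_of_perm_of_pairwise_lt d.items _ _ hzperm hlt

-- ===== VERDICT (by name: the statement is the Claim_ definition above) =====
theorem find_k_shortest_spec : Claim_equal_find_k_shortest := by
  intro strings k _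
  unfold Spec_find_k_shortest find_k_shortest find_k_shortest_alt
  dsimp only
  rw [PySem.List.foldl_append_singleton_eq_map (fun item : String × Int => item.1)]
  rw [pvBfold]
  simp only [List.nil_append]
  have hmax : (max k 0) = ((k.toNat : Nat) : Int) := by omega
  rw [hmax, PySem.List.slice_to_natCast]
  rw [pvSortedEq strings]
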